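-- pv_equiv track=rewrite | github.com/schmmd/allennlp | scripts/gh-statistics.py | process_contributions
-- ===== SOURCE A (Python) =====
-- def process_contributions(contributions):
--     if len(contributions) > 0:
--         current_date = tuple(contributions[0]["date"])
--         active_users = set()
--         results = []
--         for contribution in contributions:
--             date = tuple(contribution["date"])
--             user = contribution["user"]
--
--             if date != current_date:
--                 results.append((current_date, active_users))
--                 current_date = date
--                 active_users = set()
--
--             active_users.add(user)
--         results.append((current_date, active_users))
--
--         return results
-- ===== SOURCE B (Python) =====
-- def process_contributions(contributions):
--     if not contributions:
--         return None
--     results = []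
--     i, n = 0, len(contributions)
--     while i < n:
--         date = tuple(contributions[i]["date"])
--         j = i
--         while j < n and tuple(contributions[j]["date"]) == date:
--             j += 1
--         results.append((date, {c["user"] for c in contributions[i:j]}))
--         i = j
--     return results
-- ===== Notes on version B (the rewrite author's own statement) =====
-- stated objective: alternative
-- what changed: A's single-pass state machine carrying current_date/active_users/results across iterations is replaced by an outer loop that delimits each consecutive same-date chunk with an inner index scan and builds that chunk's user set with a set comprehension over the slice.
import Mathlib
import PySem

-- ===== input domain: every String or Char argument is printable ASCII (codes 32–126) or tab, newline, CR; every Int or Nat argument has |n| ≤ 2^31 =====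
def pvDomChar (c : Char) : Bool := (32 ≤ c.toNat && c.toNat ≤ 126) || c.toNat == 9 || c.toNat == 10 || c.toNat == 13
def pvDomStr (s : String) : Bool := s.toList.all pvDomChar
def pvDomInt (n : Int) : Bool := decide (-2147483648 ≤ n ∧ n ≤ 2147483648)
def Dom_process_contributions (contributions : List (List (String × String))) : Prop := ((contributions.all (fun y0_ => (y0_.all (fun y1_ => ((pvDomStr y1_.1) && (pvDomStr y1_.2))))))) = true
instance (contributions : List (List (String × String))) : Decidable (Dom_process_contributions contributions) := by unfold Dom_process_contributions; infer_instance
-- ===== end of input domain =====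

-- B replaces A's running state machine (current_date / active_users carried across the loop) by an
-- outer loop that finds each date-chunk with an inner scan and builds the user set per chunk (alternative decomposition).


-- shared dict lookups: under Pre_ every contribution has the keys, so getD's default is never read
def pvDate (c : List (String × String)) : List String :=
  ((PySem.Dict.mk c).getD "date" "").toList.map (fun ch => String.ofList [ch])   -- tuple(c["date"])
def pvUser (c : List (String × String)) : String := (PySem.Dict.mk c).getD "user" ""

-- ===== PORT A =====
def pvStepA (st : List String × PySem.Set String × List (List String × List String))
    (c : List (String × String)) : List String × PySem.Set String × List (List String × List String) :=
  let d := pvDate c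
  let u := pvUser c
  if d ≠ st.1 then (d, PySem.Set.add PySem.Set.empty u, st.2.2 ++ [(st.1, st.2.1)])
  else (st.1, PySem.Set.add st.2.1 u, st.2.2)

def process_contributions (contributions : List (List (String × String))) : Option (List (List String × List String)) :=
  match contributions with
  | [] => none            -- len(contributions) > 0 fails: Python falls through, returns None
  | c0 :: _ =>
    let st := contributions.foldl pvStepA (pvDate c0, PySem.Set.empty, [])
    some (st.2.2 ++ [(st.1, st.2.1)])

-- ===== PORT B =====
-- inner scan = takeWhile/dropWhile on the same date; user set built per chunk
def altGo (l : List (List (String × String))) : List (List String × List String) :=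
  match l with
  | [] => []
  | c :: rest =>
    let d := pvDate c
    let tk := rest.takeWhile (fun x => decide (pvDate x = d))
    let dr := rest.dropWhile (fun x => decide (pvDate x = d))
    (d, PySem.Set.ofList ((c :: tk).map pvUser)) :: altGo dr
termination_by l.length
decreasing_by
  simpa using Nat.lt_succ_of_le (List.length_dropWhile_le _ rest)

def process_contributions_alt (contributions : List (List (String × String))) : Option (List (List String × List String)) :=
  match contributions with
  | [] => none
  | _ :: _ => some (altGo contributions)

-- ===== PRECONDITION & SPEC =====
-- Pre_ excludes exactly the inputs where some contribution lacks key "date" or "user": there A raises KeyError.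
def Pre_process_contributions (contributions : List (List (String × String))) : Prop :=
  ∀ c ∈ contributions, "date" ∈ c.map Prod.fst ∧ "user" ∈ c.map Prod.fst
instance (contributions : List (List (String × String))) : Decidable (Pre_process_contributions contributions) := by unfold Pre_process_contributions; infer_instance
def pvWitness_process_contributions : (List (List (String × String))) :=
  [[("date", "2020-01-01"), ("user", "alice")], [("date", "2020-01-02"), ("user", "bob")]]

def Spec_process_contributions (contributions : List (List (String × String))) (out : Option (List (List String × List String))) : Prop := out = process_contributions_alt contributions
instance (contributions : List (List (String × String))) (out : Option (List (List String × List String))) : Decidable (Spec_process_contributions contributions out) := by unfold Spec_process_contributions; infer_instance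

-- ===== CLAIM (what is proved, stated in full; the proofs are below) =====
def Claim_equal_process_contributions : Prop := ∀ (contributions : List (List (String × String))), Dom_process_contributions contributions → Pre_process_contributions contributions → Spec_process_contributions contributions (process_contributions contributions)

-- ===== LEMMAS AND PROOFS =====

-- A's loop as a continuation: current date d, current user set au, remaining list
def chunkRec (d : List String) (au : PySem.Set String) :
    List (List (String × String)) → List (List String × List String)
  | [] => [(d, au)]
  | c :: rest =>
    if pvDate c = d then chunkRec d (PySem.Set.add au (pvUser c)) rest
    else (d, au) :: chunkRec (pvDate c) (PySem.Set.add PySem.Set.empty (pvUser c)) rest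

theorem foldl_stepA_eq_chunkRec (l : List (List (String × String)))
    (d : List String) (au : PySem.Set String) (res : List (List String × List String)) :
    (l.foldl pvStepA (d, au, res)).2.2 ++ [((l.foldl pvStepA (d, au, res)).1, (l.foldl pvStepA (d, au, res)).2.1)]
      = res ++ chunkRec d au l := by
  induction l generalizing d au res with
  | nil => simp [chunkRec]
  | cons c rest ih =>
    by_cases h : pvDate c = d
    · simp [List.foldl_cons, pvStepA, h, chunkRec, ih]
    · simp [List.foldl_cons, pvStepA, h, chunkRec, ih]

theorem altGo_cons (c : List (String × String)) (rest : List (List (String × String))) :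
    altGo (c :: rest)
      = (pvDate c, PySem.Set.ofList ((c :: rest.takeWhile (fun x => decide (pvDate x = pvDate c))).map pvUser))
        :: altGo (rest.dropWhile (fun x => decide (pvDate x = pvDate c))) := by
  rw [altGo.eq_def]

theorem ofList_map_cons (c : List (String × String)) (tk : List (List (String × String))) :
    PySem.Set.ofList ((c :: tk).map pvUser)
      = tk.foldl (fun s x => PySem.Set.add s (pvUser x)) (PySem.Set.add PySem.Set.empty (pvUser c)) := by
  simp [PySem.Set.ofList, List.foldl_map, PySem.Set.empty]

theorem chunkRec_eq_altGo (l : List (List (String × String)))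
    (d : List String) (au : PySem.Set String) :
    chunkRec d au l
      = (d, (l.takeWhile (fun x => decide (pvDate x = d))).foldl
              (fun s x => PySem.Set.add s (pvUser x)) au)
        :: altGo (l.dropWhile (fun x => decide (pvDate x = d))) := by
  induction l generalizing d au with
  | nil => simp [chunkRec, altGo]
  | cons c rest ih =>
    by_cases h : pvDate c = d
    · simp [chunkRec, h, ih]
    · simp only [List.takeWhile_cons, List.dropWhile_cons, decide_eq_true_eq, if_neg h,
        List.foldl_nil]
      rw [chunkRec, if_neg h, ih, altGo_cons, ofList_map_cons]

theorem process_contributions_spec : Claim_equal_process_contributions := by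
  unfold Claim_equal_process_contributions Spec_process_contributions
  intro contributions _ _
  match contributions with
  | [] => rfl
  | c0 :: rest =>
    simp only [process_contributions, process_contributions_alt]
    have h1 := foldl_stepA_eq_chunkRec (c0 :: rest) (pvDate c0) PySem.Set.empty []
    simp only [List.nil_append] at h1
    rw [h1]
    have h2 := chunkRec_eq_altGo (c0 :: rest) (pvDate c0) PySem.Set.empty
    rw [h2]
    conv_rhs => rw [altGo_cons, ofList_map_cons]
    simp
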